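-- pv_equiv track=rewrite | github.com/MyCache63/RubiksSolver | phase_decompose.py | perm_to_lehmer
-- ===== SOURCE A (Python) =====
-- def perm_to_lehmer(perm):
--     """Convert a permutation of [0..7] to its Lehmer code index."""
--     n = len(perm)
--     used = [False] * n
--     index = 0
--     factorial = [1, 1, 2, 6, 24, 120, 720, 5040]  # factorials 0..7
--     for i in range(n):
--         count = 0
--         for j in range(perm[i]):
--             if not used[j]:
--                 count += 1
--         index += count * factorial[n - 1 - i]
--         used[perm[i]] = True
--     return index
-- ===== SOURCE B (Python) =====
-- def perm_to_lehmer(perm):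
--     """Convert a permutation of [0..7] to its Lehmer code index."""
--     n = len(perm)
--     factorial = [1, 1, 2, 6, 24, 120, 720, 5040]  # factorials 0..7
--     placed = [False] * n
--     index = 0
--     for i, v in enumerate(perm):
--         # the Lehmer digit is v's insertion point in the ascending list of unused slots
--         unused = [x for x in range(n) if not placed[x]]
--         lo, hi = 0, len(unused)
--         while lo < hi:
--             mid = (lo + hi) // 2
--             if unused[mid] < v:
--                 lo = mid + 1
--             else:
--                 hi = mid
--         index += lo * factorial[n - 1 - i]
--         placed[v] = True
--     return index
-- ===== Notes on version B (the rewrite author's own statement) =====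
-- stated objective: alternative
-- what changed: Replaces A's counting scan over range(perm[i]) of the boolean table by materialising the ascending list of currently unused slots and taking perm[i]'s insertion point in it, found by a hand-rolled binary search, as the Lehmer digit; only the placed-bitmap update is kept.
import Mathlib
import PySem

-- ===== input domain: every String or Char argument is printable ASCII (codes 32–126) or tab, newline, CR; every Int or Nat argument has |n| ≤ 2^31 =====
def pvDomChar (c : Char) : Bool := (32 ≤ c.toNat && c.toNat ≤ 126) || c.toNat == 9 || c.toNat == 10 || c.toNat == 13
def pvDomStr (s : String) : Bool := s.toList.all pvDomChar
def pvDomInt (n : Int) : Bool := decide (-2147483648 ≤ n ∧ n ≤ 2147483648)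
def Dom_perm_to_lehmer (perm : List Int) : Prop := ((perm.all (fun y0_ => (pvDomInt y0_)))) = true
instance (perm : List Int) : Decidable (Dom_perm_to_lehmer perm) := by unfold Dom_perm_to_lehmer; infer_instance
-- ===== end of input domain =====

-- B replaces A's counting scan over range(perm[i]) of the boolean table by materialising the
-- ascending list of unused slots and locating perm[i]'s insertion point in it by binary search
-- (objective: alternative; same O(n^2) cost).

-- ===== PORT A =====
-- one iteration of A's `for i in range(n)` loop (body verbatim; n and the table are A's locals)
def perm_to_lehmer_stepA (perm : List Int) (st : List Bool × Int) (i : Int) : List Bool × Int :=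
  let n : Int := perm.length
  let factorial : List Int := [1, 1, 2, 6, 24, 120, 720, 5040]
  let used := st.1
  let count : Int := (PySem.List.pyRange 0 (PySem.List.pyGetD perm i 0)).foldl
    (fun c j => if !(PySem.List.pyGetD used j false) then c + 1 else c) 0
  (PySem.List.pySetD used (PySem.List.pyGetD perm i 0) true,
   st.2 + count * PySem.List.pyGetD factorial (n - 1 - i) 0)

def perm_to_lehmer (perm : List Int) : Int :=
  ((PySem.List.pyRange 0 (perm.length : Int)).foldl (perm_to_lehmer_stepA perm)
    (List.replicate perm.length false, 0)).2

-- ===== PORT B =====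
-- Source B's hand-rolled `while lo < hi` binary search; lo, hi stay in [0, len(unused)], where
-- Python's `(lo + hi) // 2` is exactly Nat division and `unused[mid]` is in range
def perm_to_lehmer_bsearch (unused : List Int) (v : Int) (lo hi : Nat) : Nat :=
  if h : lo < hi then
    let mid := (lo + hi) / 2
    if unused.getD mid 0 < v then perm_to_lehmer_bsearch unused v (mid + 1) hi
    else perm_to_lehmer_bsearch unused v lo mid
  else lo
termination_by hi - lo
decreasing_by
  · omega
  · omega

-- one iteration of B's `for i, v in enumerate(perm)` loop (body verbatim)
def perm_to_lehmer_stepB (perm : List Int) (st : List Bool × Int) (iv : Int × Int) :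
    List Bool × Int :=
  let n := perm.length
  let factorial : List Int := [1, 1, 2, 6, 24, 120, 720, 5040]
  let unused : List Int := ((List.range n).filter (fun x => !(st.1.getD x false))).map
    (fun (x : Nat) => (x : Int))
  let lo := perm_to_lehmer_bsearch unused iv.2 0 unused.length
  (PySem.List.pySetD st.1 iv.2 true,
   st.2 + (lo : Int) * PySem.List.pyGetD factorial ((n : Int) - 1 - iv.1) 0)

def perm_to_lehmer_alt (perm : List Int) : Int :=
  ((PySem.List.enumerate perm 0).foldl (perm_to_lehmer_stepB perm)
    (List.replicate perm.length false, 0)).2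

-- ===== PRECONDITION & SPEC =====
-- Pre_ is exactly where A returns: length > 8 makes `factorial[n-1-i]` raise IndexError, and an
-- entry outside [-n, n) makes `used[perm[i]]` (or the scan of `range(perm[i])`) raise IndexError.
def Pre_perm_to_lehmer (perm : List Int) : Prop :=
  perm.length ≤ 8 ∧ ∀ v ∈ perm, -(perm.length : Int) ≤ v ∧ v < (perm.length : Int)
instance (perm : List Int) : Decidable (Pre_perm_to_lehmer perm) := by
  unfold Pre_perm_to_lehmer; infer_instance
def pvWitness_perm_to_lehmer : List Int := [2, 0, 1]

def Spec_perm_to_lehmer (perm : List Int) (out : Int) : Prop := out = perm_to_lehmer_alt perm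
instance (perm : List Int) (out : Int) : Decidable (Spec_perm_to_lehmer perm out) := by
  unfold Spec_perm_to_lehmer; infer_instance

-- ===== CLAIM (what is proved, stated in full; the proofs are below) =====
def Claim_equal_perm_to_lehmer : Prop := ∀ (perm : List Int), Dom_perm_to_lehmer perm →
  Pre_perm_to_lehmer perm → Spec_perm_to_lehmer perm (perm_to_lehmer perm)

-- ===== LEMMAS AND PROOFS =====

-- A's loop body with the element taken from the (index, value) pair instead of looked up in perm;
-- on pairs of `enumerate perm 0` this is definitionally A's body
def bodyA2 (perm : List Int) (st : List Bool × Int) (iv : Int × Int) : List Bool × Int :=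
  let n : Int := perm.length
  let factorial : List Int := [1, 1, 2, 6, 24, 120, 720, 5040]
  let used := st.1
  let count : Int := (PySem.List.pyRange 0 iv.2).foldl
    (fun c j => if !(PySem.List.pyGetD used j false) then c + 1 else c) 0
  (PySem.List.pySetD used iv.2 true,
   st.2 + count * PySem.List.pyGetD factorial (n - 1 - iv.1) 0)

-- threshold: in a strictly sorted list, the entries below v are exactly the first c positions
lemma sorted_threshold (l : List Int) (v : Int) (hs : l.Pairwise (· < ·)) :
    ∀ k, k < l.length → (l.getD k 0 < v ↔ k < l.countP (fun u => decide (u < v))) := by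
  induction l with
  | nil => intro k hk; simp at hk
  | cons a t ih =>
    intro k hk
    rcases List.pairwise_cons.mp hs with ⟨ha, ht⟩
    rcases Nat.eq_zero_or_pos k with h0 | hpos
    · subst h0
      simp only [List.getD_cons_zero, List.countP_cons]
      by_cases hav : a < v
      · simp [hav]
      · have hz : t.countP (fun u => decide (u < v)) = 0 := by
          rw [List.countP_eq_zero]
          intro b hb
          simp only [decide_eq_true_eq]
          have := ha b hb
          omega
        simp [hav, hz]
    · obtain ⟨k', rfl⟩ : ∃ k', k = k' + 1 := ⟨k - 1, by omega⟩
      simp only [List.getD_cons_succ, List.countP_cons, List.length_cons] at *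
      by_cases hav : a < v
      · rw [ih ht k' (by omega)]
        simp [hav]
      · have hz : t.countP (fun u => decide (u < v)) = 0 := by
          rw [List.countP_eq_zero]
          intro b hb
          simp only [decide_eq_true_eq]
          have := ha b hb
          omega
        have hk' : k' < t.length := by omega
        have hbig : ¬ t.getD k' 0 < v := by
          have hmem : t.getD k' 0 ∈ t := by
            rw [List.getD_eq_getElem?_getD, List.getElem?_eq_getElem hk']
            exact List.getElem_mem hk'
          have := ha _ hmem
          omega
        simp [hav, hz]
        rw [List.getD_eq_getElem?_getD] at hbig
        omega

-- the binary search finds c whenever positions below c are exactly those with entry < v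

-- the binary search finds c whenever positions below c are exactly those with entry < v
lemma bsearch_eq_c (unused : List Int) (v : Int) (c : Nat)
    (hiff : ∀ k, k < unused.length → (unused.getD k 0 < v ↔ k < c)) :
    ∀ d lo hi, hi - lo = d → lo ≤ c → c ≤ hi → hi ≤ unused.length →
      perm_to_lehmer_bsearch unused v lo hi = c := by
  intro d
  induction d using Nat.strong_induction_on with
  | _ d ihd =>
    intro lo hi hd hlo hhi hlen
    rw [perm_to_lehmer_bsearch]
    by_cases h : lo < hi
    · simp only [dif_pos h]
      set mid := (lo + hi) / 2 with hmid
      have hm1 : lo ≤ mid := by omega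
      have hm2 : mid < hi := by omega
      have hml : mid < unused.length := by omega
      by_cases hv : unused.getD mid 0 < v
      · have : mid < c := (hiff mid hml).mp hv
        rw [if_pos hv]
        exact ihd (hi - (mid + 1)) (by omega) (mid + 1) hi rfl (by omega) hhi hlen
      · have : ¬ mid < c := fun hcm => hv ((hiff mid hml).mpr hcm)
        rw [if_neg hv]
        exact ihd (mid - lo) (by omega) lo mid rfl hlo (by omega) (by omega)
    · simp only [dif_neg h]
      omega

-- B's unused list is strictly sorted

-- B's unused list is strictly sorted
lemma unused_sorted (used : List Bool) :
    (((List.range used.length).filter (fun x => !(used.getD x false))).map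
      (fun (x : Nat) => (x : Int))).Pairwise (· < ·) := by
  exact List.Pairwise.map _ (fun a b h => by exact_mod_cast h)
    ((List.pairwise_lt_range (n := used.length)).filter (fun x => !(used.getD x false)))

-- the per-step digit equality: A's scan of the table equals B's insertion point

-- the per-step digit equality: A's scan of the table equals B's insertion point
lemma digit_eq (used : List Bool) (v : Int) (hv : v < (used.length : Int)) :
    (PySem.List.pyRange 0 v).foldl
      (fun c j => if !(PySem.List.pyGetD used j false) then c + 1 else c) 0 =
    (perm_to_lehmer_bsearch
      (((List.range used.length).filter (fun x => !(used.getD x false))).map (fun (x : Nat) => (x : Int)))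
      v 0
      ((((List.range used.length).filter (fun x => !(used.getD x false))).map
        (fun (x : Nat) => (x : Int))).length) : Int) := by
  set unused := ((List.range used.length).filter (fun x => !(used.getD x false))).map
    (fun (x : Nat) => (x : Int)) with hunused
  set c := unused.countP (fun u => decide (u < v)) with hcdef
  have hb : perm_to_lehmer_bsearch unused v 0 unused.length = c := by
    exact bsearch_eq_c unused v c
      (fun k hk => sorted_threshold unused v (unused_sorted used) k hk)
      (unused.length - 0) 0 unused.length rfl (Nat.zero_le c)
      (by rw [hcdef]; exact List.countP_le_length) le_rfl
  rw [hb]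
  -- c as a count over range
  have hc2 : c = (List.range used.length).countP
      (fun (x : Nat) => decide ((x : Int) < v) && !(used.getD x false)) := by
    rw [hcdef, hunused, List.countP_map, List.countP_filter]
    simp [Function.comp]
  by_cases hv0 : v ≤ 0
  · rw [PySem.List.pyRange_one_eq_nil (by omega)]
    simp only [List.foldl_nil]
    have : c = 0 := by
      rw [hc2, List.countP_eq_zero]
      intro x _
      simp only [Bool.and_eq_true, decide_eq_true_eq]
      rintro ⟨h1, -⟩
      omega
    rw [this]
    rfl
  · push Not at hv0
    rw [PySem.List.pyRange_one, List.foldl_map]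
    simp only [zero_add, PySem.List.pyGetD_natCast]
    rw [PySem.List.foldl_count_if (fun k => !(used.getD k false))]
    have hm : (v - 0).toNat ≤ used.length := by omega
    have hsplit : c = (List.range (v - 0).toNat).countP (fun k => !(used.getD k false)) := by
      rw [hc2, show used.length = (v - 0).toNat + (used.length - (v - 0).toNat) by omega,
        List.range_add, List.countP_append]
      have h1 : (List.range (v - 0).toNat).countP
          (fun (x : Nat) => decide ((x : Int) < v) && !(used.getD x false))
          = (List.range (v - 0).toNat).countP (fun k => !(used.getD k false)) := by
        apply List.countP_congr
        intro x hx
        simp only [List.mem_range] at hx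
        have : (x : Int) < v := by omega
        simp [this]
      have h2 : (((List.range (used.length - (v - 0).toNat)).map
          (fun x => (v - 0).toNat + x)).countP
          (fun (x : Nat) => decide ((x : Int) < v) && !(used.getD x false))) = 0 := by
        rw [List.countP_eq_zero]
        intro x hx
        rcases List.mem_map.mp hx with ⟨y, -, rfl⟩
        simp only [Bool.and_eq_true, decide_eq_true_eq]
        rintro ⟨h1, -⟩
        omega
      rw [h1, h2]
      omega
    rw [hsplit]
    omega

lemma loop_eq (perm : List Int) :
    ∀ (l : List Int) (s : Int) (used : List Bool) (acc : Int),
      used.length = perm.length →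
      (∀ v ∈ l, v < (perm.length : Int)) →
      (PySem.List.enumerate l s).foldl (bodyA2 perm) (used, acc) =
        (PySem.List.enumerate l s).foldl (perm_to_lehmer_stepB perm) (used, acc) := by
  intro l
  induction l with
  | nil => intro s used acc _ _; simp [PySem.List.enumerate]
  | cons v t ih =>
    intro s used acc hlen hbd
    rw [PySem.List.enumerate_cons, List.foldl_cons, List.foldl_cons]
    have hv : v < (used.length : Int) := by rw [hlen]; exact hbd v (by simp)
    have hstep : bodyA2 perm (used, acc) (s, v) = perm_to_lehmer_stepB perm (used, acc) (s, v) := by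
      simp only [bodyA2, perm_to_lehmer_stepB, digit_eq used v hv, hlen]
    rw [hstep]
    apply ih
    · simpa [PySem.List.length_pySetD] using hlen
    · intro w hw; exact hbd w (by simp [hw])

lemma final_eq (perm : List Int)
    (hb : ∀ v ∈ perm, v < (perm.length : Int)) :
    perm_to_lehmer perm = perm_to_lehmer_alt perm := by
  have hA : perm_to_lehmer perm
      = ((PySem.List.enumerate perm 0).foldl (bodyA2 perm)
          (List.replicate perm.length false, 0)).2 := by
    rw [perm_to_lehmer, PySem.List.enumerate_eq_map_pyRange perm 0, List.foldl_map]
    rfl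
  rw [hA, perm_to_lehmer_alt, loop_eq perm perm 0 _ 0 (by simp) hb]

-- ===== VERDICT (by name: the statement is the Claim_ definition above) =====
theorem perm_to_lehmer_spec : Claim_equal_perm_to_lehmer := by
  intro perm _ hpre
  exact final_eq perm (fun v hv => (hpre.2 v hv).2)
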